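-- pv_equiv track=rewrite | github.com/101rror/LeetCode | 4187-best-reachable-tower/best-reachable-tower.py | bestTower
-- ===== SOURCE A (Python) =====
-- from typing import List
--
-- def bestTower(
--     towers: List[List[int]], center: List[int], radius: int) -> List[int]:
--     cx, cy = center
--     best = -1
--     check = None
--
--     for x, y, q in towers:
--         if abs(x - cx) + abs(y - cy) <= radius:
--             if q > best:
--                 best = q
--                 check = (x, y)
--             elif q == best:
--                 if check is None or (x, y) < check:
--                     check = (x, y)
--
--     if check is None:
--         return [-1, -1]
--     return [check[0], check[1]]
-- ===== SOURCE B (Python) =====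
-- from typing import List
--
-- def bestTower(
--     towers: List[List[int]], center: List[int], radius: int) -> List[int]:
--     cx, cy = center
--     # sort all towers by (-quality, x, y); the first in-range one is the answer
--     for x, y, q in sorted(towers, key=lambda t: (-t[2], t[0], t[1])):
--         if abs(x - cx) + abs(y - cy) <= radius:
--             return [x, y]
--     return [-1, -1]
-- ===== Notes on version B (the rewrite author's own statement) =====
-- stated objective: alternative
-- what changed: Replaces A's single-pass running-best/check state machine with nested tie-break branches by sort-then-scan: sort all towers once by the key (-quality, x, y) and return the coordinates of the first in-radius tower in that order.
-- intended difference: When the winning in-radius tower (max quality, then lexicographically smallest (x,y)) has quality < -1 and is not at (-1,-1), A's sentinel best=-1 makes it ignore every in-radius tower and return [-1,-1], while B returns that winning tower's coordinates, which is the intended value. — e.g. on bestTower([[0, 0, -5]], [0, 0], 0): A returns [-1, -1], B returns [0, 0]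
import Mathlib
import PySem

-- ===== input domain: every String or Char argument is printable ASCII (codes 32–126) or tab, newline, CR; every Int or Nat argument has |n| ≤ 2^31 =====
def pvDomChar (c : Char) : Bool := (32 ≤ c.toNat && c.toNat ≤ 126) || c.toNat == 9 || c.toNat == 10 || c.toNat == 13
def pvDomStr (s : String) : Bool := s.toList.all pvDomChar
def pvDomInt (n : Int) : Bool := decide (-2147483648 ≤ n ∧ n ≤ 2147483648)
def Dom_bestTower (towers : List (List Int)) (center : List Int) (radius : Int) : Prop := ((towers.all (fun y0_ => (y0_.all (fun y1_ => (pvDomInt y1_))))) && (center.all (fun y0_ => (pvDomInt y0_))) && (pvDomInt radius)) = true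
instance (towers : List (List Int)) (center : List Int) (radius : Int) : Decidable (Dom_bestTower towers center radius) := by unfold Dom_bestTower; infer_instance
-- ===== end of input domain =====

-- B replaces A's running-best/check state machine by sort-then-scan: sort the towers
-- once by the key (-quality, x, y) and return the first in-radius tower ("alternative");
-- equivalence is proved outside D_bestTower, where A's best = -1 sentinel silently
-- drops every candidate.

-- ===== PORT A =====
-- Python tuple comparison (x, y) < check
def pairLt (p c : Int × Int) : Bool := p.1 < c.1 || (p.1 == c.1 && p.2 < c.2)

-- the for-loop of A, carrying (best, check)
def bestLoop (cx cy radius : Int) : List (List Int) → Int → Option (Int × Int) → Option (Int × Int)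
  | [], _, check => check
  | [x, y, q] :: rest, best, check =>
      if |x - cx| + |y - cy| ≤ radius then
        if q > best then bestLoop cx cy radius rest q (some (x, y))
        else if q = best then
          match check with
          | none => bestLoop cx cy radius rest best (some (x, y))
          | some c =>
              if pairLt (x, y) c then bestLoop cx cy radius rest best (some (x, y))
              else bestLoop cx cy radius rest best check
        else bestLoop cx cy radius rest best check
      else bestLoop cx cy radius rest best check
  | _ :: _, _, check => check   -- Python raises on a non-3-element tower; outside Pre_

def bestTower (towers : List (List Int)) (center : List Int) (radius : Int) : List Int :=
  match center with
  | [cx, cy] =>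
      match bestLoop cx cy radius towers (-1) none with
      | none => [-1, -1]
      | some c => [c.1, c.2]
  | _ => [-1, -1]   -- Python raises unpacking center; outside Pre_

-- ===== PORT B =====
-- the sort key lambda t: (-t[2], t[0], t[1]) as a 3-element list; Python tuple
-- comparison on ints = lexicographic list comparison (getD is exact for the
-- length-3 towers admitted by Pre_)
def kOf (t : List Int) : List Int := [-(t.getD 2 0), t.getD 0 0, t.getD 1 0]

-- the for-loop of B: first tower of the (sorted) list within the radius
def scanB (cx cy radius : Int) : List (List Int) → List Int
  | [] => [-1, -1]
  | [x, y, q] :: rest =>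
      if |x - cx| + |y - cy| ≤ radius then [x, y] else scanB cx cy radius rest
  | _ :: _ => [-1, -1]   -- Python raises unpacking a non-3-element tower; outside Pre_

def bestTower_alt (towers : List (List Int)) (center : List Int) (radius : Int) : List Int :=
  match center with
  | [cx, cy] =>
      scanB cx cy radius (@PySem.List.sorted _ _ LinearOrder.toPartialOrder.toLT
        LinearOrder.toDecidableLT towers kOf false)
  | _ => [-1, -1]   -- Python raises unpacking center; outside Pre_

-- ===== PRECONDITION & SPEC =====
-- Pre_ excludes exactly the inputs on which the Python A raises (ValueError while
-- unpacking): center must have 2 elements and every tower 3.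
def Pre_bestTower (towers : List (List Int)) (center : List Int) (radius : Int) : Prop :=
  center.length = 2 ∧ ∀ t ∈ towers, t.length = 3
instance (towers : List (List Int)) (center : List Int) (radius : Int) : Decidable (Pre_bestTower towers center radius) := by unfold Pre_bestTower; infer_instance

def pvWitness_bestTower : List (List Int) × List Int × Int := ([[1, 2, 5], [0, 0, 5]], [0, 0], 4)

-- t is within Manhattan radius of the center (entries read with getD, 0 if absent)
abbrev dOK (center : List Int) (radius : Int) (t : List Int) : Prop :=
  |t.head! - center.head!| + |t.tail.head! - center.tail.head!| ≤ radius

-- When the winning in-radius tower (max quality, then lexicographically smallest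
-- (x, y)) has quality < -1 and does not sit at (-1, -1), A's sentinel best = -1
-- rejects every in-radius tower and returns [-1, -1], while B returns that winning
-- tower's coordinates, which is the intended value.
def dK (t : List Int) : List Int := -t.tail.tail.head! :: t.take 2

def D_bestTower (towers : List (List Int)) (center : List Int) (radius : Int) : Prop :=
  ∃ t ∈ towers, dOK center radius t ∧ [2] ≤ dK t ∧ t.take 2 ≠ [-1, -1] ∧
    ∀ s ∈ towers, dOK center radius s → dK t ≤ dK s
instance (towers : List (List Int)) (center : List Int) (radius : Int) : Decidable (D_bestTower towers center radius) := by unfold D_bestTower; infer_instance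

def Spec_bestTower (towers : List (List Int)) (center : List Int) (radius : Int) (out : List Int) : Prop := ¬ D_bestTower towers center radius → out = bestTower_alt towers center radius
instance (towers : List (List Int)) (center : List Int) (radius : Int) (out : List Int) : Decidable (Spec_bestTower towers center radius out) := by unfold Spec_bestTower; infer_instance

def pvDiffWitness_bestTower : List (List Int) × List Int × Int := ([[0, 0, -5]], [0, 0], 0)
def pvDiffWitnessOut_bestTower : (List Int) × (List Int) := ([-1, -1], [0, 0])

-- ===== CLAIM (what is proved, stated in full; the proofs are below) =====
def Claim_unchanged_bestTower : Prop := ∀ (towers : List (List Int)) (center : List Int) (radius : Int), Dom_bestTower towers center radius → Pre_bestTower towers center radius → Spec_bestTower towers center radius (bestTower towers center radius)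
def Claim_exact_bestTower : Prop := ∀ (towers : List (List Int)) (center : List Int) (radius : Int), Dom_bestTower towers center radius → Pre_bestTower towers center radius → D_bestTower towers center radius → bestTower towers center radius ≠ bestTower_alt towers center radius
def Claim_changed_bestTower : Prop := Dom_bestTower (pvDiffWitness_bestTower.1) (pvDiffWitness_bestTower.2.1) (pvDiffWitness_bestTower.2.2) ∧ Pre_bestTower (pvDiffWitness_bestTower.1) (pvDiffWitness_bestTower.2.1) (pvDiffWitness_bestTower.2.2) ∧ D_bestTower (pvDiffWitness_bestTower.1) (pvDiffWitness_bestTower.2.1) (pvDiffWitness_bestTower.2.2) ∧ bestTower (pvDiffWitness_bestTower.1) (pvDiffWitness_bestTower.2.1) (pvDiffWitness_bestTower.2.2) = pvDiffWitnessOut_bestTower.1 ∧ bestTower_alt (pvDiffWitness_bestTower.1) (pvDiffWitness_bestTower.2.1) (pvDiffWitness_bestTower.2.2) = pvDiffWitnessOut_bestTower.2 ∧ pvDiffWitnessOut_bestTower.1 ≠ pvDiffWitnessOut_bestTower.2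

-- ===== LEMMAS AND PROOFS =====

-- PROOF-ONLY: the loop test of B as a Bool predicate on a tower, and B's scan as
-- a find-first
def inRange (cx cy radius : Int) (t : List Int) : Bool :=
  decide (|t.getD 0 0 - cx| + |t.getD 1 0 - cy| ≤ radius)

theorem scanB_eq (cx cy radius : Int) (S : List (List Int))
    (h3 : ∀ t ∈ S, t.length = 3) :
    scanB cx cy radius S =
      match S.find? (inRange cx cy radius) with
      | some t => [t.getD 0 0, t.getD 1 0]
      | none => [-1, -1] := by
  induction S with
  | nil => rfl
  | cons t rest ih =>
    obtain ⟨x, y, q, rfl⟩ : ∃ x y q, t = [x, y, q] := by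
      have := h3 t (List.mem_cons_self)
      match t with
      | [x, y, q] => exact ⟨x, y, q, rfl⟩
    have h3' : ∀ t ∈ rest, t.length = 3 := fun t ht => h3 t (List.mem_cons_of_mem _ ht)
    by_cases hr : |x - cx| + |y - cy| ≤ radius
    · rw [List.find?_cons_of_pos (by simp [inRange, List.getD, hr])]
      simp [scanB, hr, List.getD]
    · rw [List.find?_cons_of_neg (by simp [inRange, List.getD, hr])]
      simp only [scanB, if_neg hr]
      exact ih h3'

-- PROOF-ONLY common view of both ports: the in-radius candidates as (x, y, q)
-- triples, and the first candidate of minimal key (-q, x, y).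
def cands (cx cy radius : Int) (ts : List (List Int)) : List (Int × Int × Int) :=
  ts.filterMap fun t =>
    match t with
    | [x, y, q] => if |x - cx| + |y - cy| ≤ radius then some (x, y, q) else none
    | _ => none

def keyOf (t : Int × Int × Int) : Int × Int × Int := (-t.2.2, t.1, t.2.1)

-- lexicographic < on the key triples
def keyLt (a b : Int × Int × Int) : Bool :=
  a.1 < b.1 || (a.1 == b.1 && (a.2.1 < b.2.1 || (a.2.1 == b.2.1 && a.2.2 < b.2.2)))

-- first element with minimal key
def minBy (c : Int × Int × Int) (cs : List (Int × Int × Int)) : Int × Int × Int :=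
  cs.foldl (fun a b => if keyLt (keyOf b) (keyOf a) then b else a) c

def minCoords (l : List (Int × Int × Int)) : Option (Int × Int) :=
  match l with
  | [] => none
  | g :: gs => some ((minBy g gs).1, (minBy g gs).2.1)

-- "good" candidates: quality ≥ -1 (the ones A's sentinel can ever accept)
def goodC (c : Int × Int × Int) : Bool := decide (-1 ≤ c.2.2)

theorem minCoords_cons (g : Int × Int × Int) (gs : List (Int × Int × Int)) :
    minCoords (g :: gs) = some ((minBy g gs).1, (minBy g gs).2.1) := rfl

theorem minBy_cons_true (c b : Int × Int × Int) (l : List (Int × Int × Int))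
    (h : keyLt (keyOf b) (keyOf c) = true) : minBy c (b :: l) = minBy b l := by
  simp [minBy, h]

theorem minBy_cons_false (c b : Int × Int × Int) (l : List (Int × Int × Int))
    (h : keyLt (keyOf b) (keyOf c) = false) : minBy c (b :: l) = minBy c l := by
  simp [minBy, h]

theorem keyLt_bad_good (b c : Int × Int × Int) (hb : b.2.2 < -1) (hc : -1 ≤ c.2.2) :
    keyLt (keyOf b) (keyOf c) = false := by
  simp only [keyLt, keyOf, Bool.or_eq_false_iff, Bool.and_eq_false_iff,
    decide_eq_false_iff_not, not_lt, beq_eq_false_iff_ne]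
  exact ⟨by omega, Or.inl (by omega)⟩

theorem keyLt_good_bad (b c : Int × Int × Int) (hb : -1 ≤ b.2.2) (hc : c.2.2 < -1) :
    keyLt (keyOf b) (keyOf c) = true := by
  simp only [keyLt, keyOf, Bool.or_eq_true, decide_eq_true_eq]
  left; omega

theorem keyLt_lt (b c : Int × Int × Int) (h : c.2.2 < b.2.2) :
    keyLt (keyOf b) (keyOf c) = true := by
  simp only [keyLt, keyOf, Bool.or_eq_true, decide_eq_true_eq]
  left; omega

theorem keyLt_gt (b c : Int × Int × Int) (h : b.2.2 < c.2.2) :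
    keyLt (keyOf b) (keyOf c) = false := by
  simp only [keyLt, keyOf, Bool.or_eq_false_iff, Bool.and_eq_false_iff,
    decide_eq_false_iff_not, not_lt, beq_eq_false_iff_ne]
  exact ⟨by omega, Or.inl (by omega)⟩

-- at equal quality, the key order is exactly Python's (x, y) tuple order
theorem keyLt_eq_pairLt (x y : Int) (c : Int × Int × Int) :
    keyLt (keyOf (x, y, c.2.2)) (keyOf c) = pairLt (x, y) (c.1, c.2.1) := by
  simp [keyLt, keyOf, pairLt]
  rfl

-- a bad element in the list never beats a good accumulator
theorem minBy_filter_good (l : List (Int × Int × Int)) (c : Int × Int × Int)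
    (hc : -1 ≤ c.2.2) : minBy c l = minBy c (l.filter goodC) := by
  induction l generalizing c with
  | nil => rfl
  | cons b rest ih =>
    by_cases hb : -1 ≤ b.2.2
    · have hg : goodC b = true := by simp [goodC, hb]
      simp only [List.filter_cons, hg, if_pos]
      simp only [minBy, List.foldl_cons]
      split
      · exact ih b hb
      · exact ih c hc
    · have hg : goodC b = false := by simp [goodC]; omega
      rw [List.filter_cons_of_neg (by simp [hg]),
        minBy_cons_false c b rest (keyLt_bad_good b c (by omega) hc)]
      exact ih c hc

-- with a bad accumulator, the result is the min over the good elements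
theorem minBy_bad (l : List (Int × Int × Int)) (c : Int × Int × Int)
    (hc : c.2.2 < -1) (hne : l.filter goodC ≠ []) :
    (match l.filter goodC with
     | [] => minBy c l
     | g :: gs => minBy g gs) = minBy c l := by
  induction l generalizing c with
  | nil => simp at hne
  | cons b rest ih =>
    by_cases hb : -1 ≤ b.2.2
    · have hg : goodC b = true := by simp [goodC, hb]
      rw [List.filter_cons_of_pos hg, minBy_cons_true c b rest (keyLt_good_bad b c hb hc),
        minBy_filter_good rest b hb]
    · have hg : goodC b = false := by simp [goodC]; omega
      have hfe : (b :: rest).filter goodC = rest.filter goodC :=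
        List.filter_cons_of_neg (by simp [hg])
      rw [hfe] at hne
      rw [hfe]
      rcases Bool.eq_false_or_eq_true (keyLt (keyOf b) (keyOf c)) with hk | hk
      · rw [minBy_cons_true c b rest hk]; exact ih b (by omega) hne
      · rw [minBy_cons_false c b rest hk]; exact ih c hc hne

-- Python min over a list vs over its good-filtered sublist, when a good element exists
theorem minCoords_filter (l : List (Int × Int × Int)) (hne : l.filter goodC ≠ []) :
    minCoords l = minCoords (l.filter goodC) := by
  cases l with
  | nil => simp at hne
  | cons b rest =>
    by_cases hb : -1 ≤ b.2.2
    · have hg : goodC b = true := by simp [goodC, hb]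
      rw [List.filter_cons_of_pos hg, minCoords_cons, minCoords_cons,
        minBy_filter_good rest b hb]
    · have hg : goodC b = false := by simp [goodC]; omega
      have hfe : (b :: rest).filter goodC = rest.filter goodC :=
        List.filter_cons_of_neg (by simp [hg])
      rw [hfe] at hne
      rw [hfe, minCoords_cons]
      cases hgc : rest.filter goodC with
      | nil => exact absurd hgc hne
      | cons g gs =>
        rw [minCoords_cons]
        have h2 : minBy g gs = minBy b rest := by
          have := minBy_bad rest b (by omega) hne
          rw [hgc] at this
          exact this
        rw [h2]

theorem cands_cons3 (cx cy radius x y q : Int) (rest : List (List Int)) :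
    cands cx cy radius ([x, y, q] :: rest) =
      if |x - cx| + |y - cy| ≤ radius then (x, y, q) :: cands cx cy radius rest
      else cands cx cy radius rest := by
  by_cases hr : |x - cx| + |y - cy| ≤ radius <;>
    simp only [cands, List.filterMap_cons, hr, if_pos, if_neg, if_true, if_false,
      ite_true, ite_false]

-- A's loop, once a candidate (with best = its quality) is held, is the running min
theorem bestLoop_some (cx cy radius : Int) (ts : List (List Int))
    (h3 : ∀ t ∈ ts, t.length = 3) (c : Int × Int × Int) :
    bestLoop cx cy radius ts c.2.2 (some (c.1, c.2.1)) =
      some ((minBy c (cands cx cy radius ts)).1, (minBy c (cands cx cy radius ts)).2.1) := by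
  induction ts generalizing c with
  | nil => simp [bestLoop, cands, minBy]
  | cons t rest ih =>
    obtain ⟨x, y, q, rfl⟩ : ∃ x y q, t = [x, y, q] := by
      have := h3 t (List.mem_cons_self)
      match t with
      | [x, y, q] => exact ⟨x, y, q, rfl⟩
    have h3' : ∀ t ∈ rest, t.length = 3 := fun t ht => h3 t (List.mem_cons_of_mem _ ht)
    rw [cands_cons3]
    by_cases hr : |x - cx| + |y - cy| ≤ radius
    · rw [if_pos hr]
      simp only [bestLoop, if_pos hr]
      by_cases hq : q > c.2.2
      · rw [if_pos hq, minBy_cons_true c (x, y, q) _ (keyLt_lt (x, y, q) c hq)]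
        exact ih h3' (x, y, q)
      · rw [if_neg hq]
        by_cases he : q = c.2.2
        · rw [if_pos he]
          subst he
          by_cases hp : pairLt (x, y) (c.1, c.2.1) = true
          · rw [if_pos hp,
              minBy_cons_true c (x, y, c.2.2) _ ((keyLt_eq_pairLt x y c).trans hp)]
            exact ih h3' (x, y, c.2.2)
          · rw [if_neg hp,
              minBy_cons_false c (x, y, c.2.2) _
                ((keyLt_eq_pairLt x y c).trans (Bool.not_eq_true _ ▸ hp))]
            exact ih h3' c
        · rw [if_neg he,
            minBy_cons_false c (x, y, q) _ (keyLt_gt (x, y, q) c (by show q < c.2.2; omega))]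
          exact ih h3' c
    · rw [if_neg hr]
      simp only [bestLoop, if_neg hr]
      exact ih h3' c

-- A's loop from the initial state is the min over the good candidates
theorem bestLoop_start (cx cy radius : Int) (ts : List (List Int))
    (h3 : ∀ t ∈ ts, t.length = 3) :
    bestLoop cx cy radius ts (-1) none =
      ((cands cx cy radius ts).filter goodC |> minCoords) := by
  induction ts with
  | nil => simp [bestLoop, cands, minCoords]
  | cons t rest ih =>
    obtain ⟨x, y, q, rfl⟩ : ∃ x y q, t = [x, y, q] := by
      have := h3 t (List.mem_cons_self)
      match t with
      | [x, y, q] => exact ⟨x, y, q, rfl⟩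
    have h3' : ∀ t ∈ rest, t.length = 3 := fun t ht => h3 t (List.mem_cons_of_mem _ ht)
    rw [cands_cons3]
    by_cases hr : |x - cx| + |y - cy| ≤ radius
    · rw [if_pos hr]
      simp only [bestLoop, if_pos hr]
      by_cases hq : q > -1
      · rw [if_pos hq, List.filter_cons_of_pos (by simp [goodC]; omega), minCoords_cons]
        have := bestLoop_some cx cy radius rest h3' (x, y, q)
        simp only at this
        rw [this, minBy_filter_good _ _ (by simp; omega)]
      · rw [if_neg hq]
        by_cases he : q = -1
        · subst he
          rw [if_pos rfl, List.filter_cons_of_pos (by simp [goodC]), minCoords_cons]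
          have := bestLoop_some cx cy radius rest h3' (x, y, -1)
          simp only at this
          rw [this, minBy_filter_good _ _ (by simp)]
        · rw [if_neg he, List.filter_cons_of_neg (by simp [goodC]; omega)]
          exact ih h3'
    · rw [if_neg hr]
      simp only [bestLoop, if_neg hr]
      exact ih h3'

theorem gcands_eq_nil_iff (cx cy radius : Int) (ts : List (List Int))
    (h3 : ∀ t ∈ ts, t.length = 3) :
    ((cands cx cy radius ts).filter goodC = [] ↔
      ∀ t ∈ ts, t.length = 3 → |t.getD 0 0 - cx| + |t.getD 1 0 - cy| ≤ radius →
        t.getD 2 0 < -1) := by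
  induction ts with
  | nil => simp [cands]
  | cons t rest ih =>
    obtain ⟨x, y, q, rfl⟩ : ∃ x y q, t = [x, y, q] := by
      have := h3 t (List.mem_cons_self)
      match t with
      | [x, y, q] => exact ⟨x, y, q, rfl⟩
    have h3' : ∀ t ∈ rest, t.length = 3 := fun t ht => h3 t (List.mem_cons_of_mem _ ht)
    rw [cands_cons3]
    by_cases hr : |x - cx| + |y - cy| ≤ radius
    · rw [if_pos hr]
      by_cases hb : -1 ≤ q
      · rw [List.filter_cons_of_pos (by simp [goodC]; omega)]
        constructor
        · intro h; simp at h
        · intro h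
          have := h [x, y, q] List.mem_cons_self rfl (by simpa [List.getD] using hr)
          simp [List.getD] at this
          omega
      · rw [List.filter_cons_of_neg (by simp [goodC]; omega), ih h3']
        constructor
        · intro h t ht
          rcases List.mem_cons.mp ht with rfl | ht'
          · intro _ _; simp [List.getD]; omega
          · exact h t ht'
        · intro h t ht
          exact h t (List.mem_cons_of_mem _ ht)
    · rw [if_neg hr, ih h3']
      constructor
      · intro h t ht
        rcases List.mem_cons.mp ht with rfl | ht'
        · intro _ hle; exact absurd (by simpa [List.getD] using hle) hr
        · exact h t ht'
      · intro h t ht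
        exact h t (List.mem_cons_of_mem _ ht)

-- the min is one of the candidates
theorem minBy_mem (l : List (Int × Int × Int)) (c : Int × Int × Int) :
    minBy c l = c ∨ minBy c l ∈ l := by
  induction l generalizing c with
  | nil => left; rfl
  | cons b rest ih =>
    have hstep : minBy c (b :: rest) =
        minBy (if keyLt (keyOf b) (keyOf c) = true then b else c) rest := rfl
    rw [hstep]
    rcases ih (if keyLt (keyOf b) (keyOf c) = true then b else c) with h | h
    · rw [h]
      split
      · right; exact List.mem_cons_self
      · left; rfl
    · right; exact List.mem_cons_of_mem _ h

-- every candidate comes from an in-radius tower of the list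
theorem mem_cands (cx cy radius : Int) (ts : List (List Int))
    (h3 : ∀ t ∈ ts, t.length = 3) (p : Int × Int × Int)
    (hp : p ∈ cands cx cy radius ts) :
    [p.1, p.2.1, p.2.2] ∈ ts ∧ |p.1 - cx| + |p.2.1 - cy| ≤ radius := by
  induction ts with
  | nil => simp [cands] at hp
  | cons t rest ih =>
    obtain ⟨x, y, q, rfl⟩ : ∃ x y q, t = [x, y, q] := by
      have := h3 t (List.mem_cons_self)
      match t with
      | [x, y, q] => exact ⟨x, y, q, rfl⟩
    have h3' : ∀ t ∈ rest, t.length = 3 := fun t ht => h3 t (List.mem_cons_of_mem _ ht)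
    rw [cands_cons3] at hp
    by_cases hr : |x - cx| + |y - cy| ≤ radius
    · rw [if_pos hr] at hp
      rcases List.mem_cons.mp hp with rfl | hp'
      · exact ⟨List.mem_cons_self, hr⟩
      · obtain ⟨h1, h2⟩ := ih h3' hp'
        exact ⟨List.mem_cons_of_mem _ h1, h2⟩
    · rw [if_neg hr] at hp
      obtain ⟨h1, h2⟩ := ih h3' hp
      exact ⟨List.mem_cons_of_mem _ h1, h2⟩

-- non-strict lexicographic order on key triples, with its basic facts
def tripLe (a b : Int × Int × Int) : Prop :=
  a.1 < b.1 ∨ (a.1 = b.1 ∧ (a.2.1 < b.2.1 ∨ (a.2.1 = b.2.1 ∧ a.2.2 ≤ b.2.2)))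

theorem tripLe_refl (a : Int × Int × Int) : tripLe a a := by unfold tripLe; omega

theorem tripLe_trans (a b c : Int × Int × Int) (h1 : tripLe a b) (h2 : tripLe b c) :
    tripLe a c := by unfold tripLe at *; omega

theorem keyLt_false_le (a b : Int × Int × Int) (h : keyLt a b = false) : tripLe b a := by
  simp only [keyLt, Bool.or_eq_false_iff, Bool.and_eq_false_iff,
    decide_eq_false_iff_not, not_lt, beq_eq_false_iff_ne] at h
  unfold tripLe
  omega

theorem keyLt_true_le (a b : Int × Int × Int) (h : keyLt a b = true) : tripLe a b := by
  simp only [keyLt, Bool.or_eq_true, Bool.and_eq_true, decide_eq_true_eq,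
    beq_iff_eq] at h
  unfold tripLe
  omega

-- the min has key ≤ the accumulator's key
theorem minBy_le_acc (l : List (Int × Int × Int)) (c : Int × Int × Int) :
    tripLe (keyOf (minBy c l)) (keyOf c) := by
  induction l generalizing c with
  | nil => exact tripLe_refl _
  | cons b rest ih =>
    have hstep : minBy c (b :: rest) =
        minBy (if keyLt (keyOf b) (keyOf c) = true then b else c) rest := rfl
    rw [hstep]
    refine tripLe_trans _ _ _ (ih _) ?_
    split
    · next hk => exact keyLt_true_le _ _ hk
    · exact tripLe_refl _

-- the min has the least key among the candidates
theorem minBy_le (l : List (Int × Int × Int)) (c s : Int × Int × Int)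
    (hs : s = c ∨ s ∈ l) : tripLe (keyOf (minBy c l)) (keyOf s) := by
  induction l generalizing c with
  | nil =>
    rcases hs with rfl | h
    · exact tripLe_refl _
    · simp at h
  | cons b rest ih =>
    have hstep : minBy c (b :: rest) =
        minBy (if keyLt (keyOf b) (keyOf c) = true then b else c) rest := rfl
    rw [hstep]
    have hacc_c : tripLe (keyOf (if keyLt (keyOf b) (keyOf c) = true then b else c)) (keyOf c) := by
      split
      · next hk => exact keyLt_true_le _ _ hk
      · exact tripLe_refl _
    have hacc_b : tripLe (keyOf (if keyLt (keyOf b) (keyOf c) = true then b else c)) (keyOf b) := by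
      split
      · exact tripLe_refl _
      · next hk => exact keyLt_false_le _ _ (Bool.not_eq_true _ ▸ hk)
    rcases hs with rfl | hmem
    · exact tripLe_trans _ _ _ (minBy_le_acc rest _) hacc_c
    · rcases List.mem_cons.mp hmem with rfl | hmem'
      · exact tripLe_trans _ _ _ (minBy_le_acc rest _) hacc_b
      · exact ih _ (Or.inr hmem')

-- an in-radius length-3 tower yields its candidate
theorem cands_of_mem (cx cy radius : Int) (ts : List (List Int)) (x y q : Int)
    (hm : [x, y, q] ∈ ts) (hr : |x - cx| + |y - cy| ≤ radius) :
    (x, y, q) ∈ cands cx cy radius ts := by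
  simp only [cands, List.mem_filterMap]
  exact ⟨[x, y, q], hm, by simp [hr]⟩

-- Python's < on two 3-element int lists, spelled out
theorem listLt3_iff (a b c a' b' c' : Int) :
    ([a, b, c] < [a', b', c']) ↔ (a < a' ∨ (a = a' ∧ (b < b' ∨ (b = b' ∧ c < c')))) := by
  constructor
  · intro h
    cases h with
    | rel h => exact Or.inl h
    | cons h =>
      refine Or.inr ⟨rfl, ?_⟩
      cases h with
      | rel h => exact Or.inl h
      | cons h =>
        refine Or.inr ⟨rfl, ?_⟩
        cases h with
        | rel h => exact h
        | cons h => cases h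
  · rintro (h | ⟨rfl, h | ⟨rfl, h⟩⟩)
    · exact List.Lex.rel h
    · exact List.Lex.cons (List.Lex.rel h)
    · exact List.Lex.cons (List.Lex.cons (List.Lex.rel h))

-- dK on a length-3 tower, spelled out
theorem dK_eq (x y q : Int) : dK [x, y, q] = [-q, x, y] := rfl

theorem dOK_cons (cx cy radius x y q : Int) :
    dOK [cx, cy] radius [x, y, q] ↔ |x - cx| + |y - cy| ≤ radius := by
  simp [dOK]

-- the dK key ≤ on two length-3 towers is tripLe on the (-q, x, y) triples
theorem dK_le_iff (x y q x' y' q' : Int) :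
    dK [x, y, q] ≤ dK [x', y', q'] ↔ tripLe (keyOf (x, y, q)) (keyOf (x', y', q')) := by
  rw [dK_eq, dK_eq, ← not_lt, listLt3_iff]
  simp only [keyOf, tripLe]
  omega

theorem listLt31_iff (a b c d : Int) : ([a, b, c] < [d]) ↔ a < d := by
  constructor
  · intro h
    cases h with
    | rel h => exact h
    | cons h => cases h
  · intro h
    exact List.Lex.rel h

-- the [2] ≤ dK t clause of D_ is exactly "quality < -1"
theorem two_le_dK_iff (x y q : Int) : [(2 : Int)] ≤ dK [x, y, q] ↔ q < -1 := by
  rw [dK_eq, ← not_lt, listLt31_iff]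
  omega

-- the list key ≤ on two length-3 towers is tripLe on the (-q, x, y) triples
theorem kOf_le_iff (x y q x' y' q' : Int) :
    kOf [x, y, q] ≤ kOf [x', y', q'] ↔ tripLe (keyOf (x, y, q)) (keyOf (x', y', q')) := by
  simp only [kOf, List.getD, List.getElem?_cons_zero, List.getElem?_cons_succ,
    Option.getD_some, keyOf, tripLe]
  rw [← not_lt, listLt3_iff]
  omega

-- in a list pairwise-sorted by key, find? returns an element of least key among hits
theorem find?_sorted_min (S : List (List Int)) (p : List Int → Bool) (t : List Int)
    (hpw : S.Pairwise (fun a b => kOf a ≤ kOf b)) (hf : S.find? p = some t) :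
    ∀ s ∈ S, p s = true → kOf t ≤ kOf s := by
  induction S with
  | nil => simp at hf
  | cons a rest ih =>
    rcases List.pairwise_cons.mp hpw with ⟨ha, hrest⟩
    by_cases hpa : p a = true
    · rw [List.find?_cons_of_pos hpa] at hf
      cases hf
      intro s hs _
      rcases List.mem_cons.mp hs with rfl | hs'
      · exact le_refl _
      · exact ha s hs'
    · rw [List.find?_cons_of_neg hpa] at hf
      intro s hs hps
      rcases List.mem_cons.mp hs with rfl | hs'
      · exact absurd hps hpa
      · exact ih hrest hf s hs' hps

-- definitional unfoldings of the two ports for a well-formed center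
theorem bestTower_eq (cx cy radius : Int) (towers : List (List Int)) :
    bestTower towers [cx, cy] radius =
      match bestLoop cx cy radius towers (-1) none with
      | none => [-1, -1]
      | some c => [c.1, c.2] := rfl

-- B's sorted-scan equals the min over the candidates
theorem bestTower_alt_eq (cx cy radius : Int) (towers : List (List Int))
    (h3 : ∀ t ∈ towers, t.length = 3) :
    bestTower_alt towers [cx, cy] radius =
      match minCoords (cands cx cy radius towers) with
      | none => [-1, -1]
      | some c => [c.1, c.2] := by
  have hpw : (@PySem.List.sorted _ _ LinearOrder.toPartialOrder.toLT
      LinearOrder.toDecidableLT towers kOf false).Pairwise (fun a b => kOf a ≤ kOf b) :=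
    PySem.List.sorted_pairwise towers kOf
  have h3S : ∀ t ∈ (@PySem.List.sorted _ _ LinearOrder.toPartialOrder.toLT
      LinearOrder.toDecidableLT towers kOf false), t.length = 3 := fun t ht =>
    h3 t ((@PySem.List.mem_sorted _ _ LinearOrder.toPartialOrder.toLT
      LinearOrder.toDecidableLT towers kOf false t).mp ht)
  show scanB cx cy radius _ = _
  rw [scanB_eq cx cy radius _ h3S]
  cases hf : (@PySem.List.sorted _ _ LinearOrder.toPartialOrder.toLT
      LinearOrder.toDecidableLT towers kOf false).find? (inRange cx cy radius) with
  | none =>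
    have hno : ∀ s ∈ towers, ¬ inRange cx cy radius s = true := by
      intro s hs
      exact List.find?_eq_none.mp hf s ((@PySem.List.mem_sorted _ _ LinearOrder.toPartialOrder.toLT LinearOrder.toDecidableLT towers kOf false s).mpr hs)
    have hcn : cands cx cy radius towers = [] := by
      rw [cands, List.filterMap_eq_nil_iff]
      intro t ht
      obtain ⟨x, y, q, rfl⟩ : ∃ x y q, t = [x, y, q] := by
        have := h3 t ht
        match t with
        | [x, y, q] => exact ⟨x, y, q, rfl⟩
      have := hno [x, y, q] ht
      simp only [inRange, List.getD, List.getElem?_cons_zero, List.getElem?_cons_succ,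
        Option.getD_some, decide_eq_true_eq] at this
      simp [this]
    rw [hcn]
    rfl
  | some t =>
    have htmem : t ∈ towers :=
      (@PySem.List.mem_sorted _ _ LinearOrder.toPartialOrder.toLT LinearOrder.toDecidableLT towers kOf false _).mp (List.mem_of_find?_eq_some hf)
    have htp : inRange cx cy radius t = true := List.find?_some hf
    obtain ⟨x, y, q, rfl⟩ : ∃ x y q, t = [x, y, q] := by
      have := h3 t htmem
      match t with
      | [x, y, q] => exact ⟨x, y, q, rfl⟩
    have hrr : |x - cx| + |y - cy| ≤ radius := by
      simpa [inRange, List.getD] using htp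
    have hmin := find?_sorted_min _ _ _ hpw hf
    have hpc : (x, y, q) ∈ cands cx cy radius towers :=
      cands_of_mem cx cy radius towers x y q htmem hrr
    cases hcl : cands cx cy radius towers with
    | nil => rw [hcl] at hpc; simp at hpc
    | cons c cs =>
      rw [minCoords_cons]
      set m := minBy c cs with hm
      -- m is a candidate; its tower is in-radius and in the sorted list
      obtain ⟨hmemM, hrleM⟩ := mem_cands cx cy radius towers h3 m (by
        rw [hcl]
        rcases minBy_mem cs c with h | h
        · rw [hm, h]; exact List.mem_cons_self
        · exact List.mem_cons_of_mem _ (hm ▸ h))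
      -- kOf t ≤ kOf (m's tower): m's tower is a hit of the sorted list
      have h1 : kOf [x, y, q] ≤ kOf [m.1, m.2.1, m.2.2] := by
        apply hmin [m.1, m.2.1, m.2.2] ((@PySem.List.mem_sorted _ _ LinearOrder.toPartialOrder.toLT LinearOrder.toDecidableLT towers kOf false _).mpr hmemM)
        simp only [inRange, List.getD, List.getElem?_cons_zero, List.getElem?_cons_succ,
          Option.getD_some, decide_eq_true_eq]
        exact hrleM
      -- keyOf m ≤ keyOf (x, y, q): m is the min of the candidates
      have h2 : tripLe (keyOf m) (keyOf (x, y, q)) := by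
        apply minBy_le cs c
        rcases List.mem_cons.mp (hcl ▸ hpc) with h | h
        · exact Or.inl h
        · exact Or.inr h
      rw [kOf_le_iff] at h1
      -- antisymmetry on the first two components
      unfold tripLe keyOf at h1 h2
      simp only at h1 h2
      have hx : x = m.1 := by omega
      have hy : y = m.2.1 := by omega
      simp [List.getD, hx, hy]

-- ===== VERDICT (by name: the statement is the Claim_ definition above) =====
theorem bestTower_spec : Claim_unchanged_bestTower := by
  intro towers center radius _ hpre hnd
  obtain ⟨hc2, h3⟩ := hpre
  obtain ⟨cx, cy, rfl⟩ : ∃ cx cy, center = [cx, cy] := by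
    match center, hc2 with
    | [cx, cy], _ => exact ⟨cx, cy, rfl⟩
  show bestTower towers [cx, cy] radius = bestTower_alt towers [cx, cy] radius
  rw [bestTower_eq, bestTower_alt_eq cx cy radius towers h3,
    bestLoop_start cx cy radius towers h3]
  cases hgc : (cands cx cy radius towers).filter goodC with
  | cons g gs =>
    rw [minCoords_filter (cands cx cy radius towers) (by simp [hgc]), hgc]
  | nil =>
    cases hcl : cands cx cy radius towers with
    | nil => rfl
    | cons c cs =>
      -- every in-radius tower is bad; the min candidate m beats all of them, so by
      -- ¬D_ it sits at (-1,-1) and B also returns [-1,-1]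
      obtain ⟨hmemM, hrleM⟩ := mem_cands cx cy radius towers h3 (minBy c cs) (by
        rw [hcl]
        rcases minBy_mem cs c with h | h
        · rw [h]; exact List.mem_cons_self
        · exact List.mem_cons_of_mem _ h)
      have hqM : (minBy c cs).2.2 < -1 :=
        (gcands_eq_nil_iff cx cy radius towers h3).mp hgc
          [(minBy c cs).1, (minBy c cs).2.1, (minBy c cs).2.2] hmemM rfl hrleM
      have hbeats : ∀ s ∈ towers, dOK [cx, cy] radius s →
          dK [(minBy c cs).1, (minBy c cs).2.1, (minBy c cs).2.2] ≤ dK s := by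
        intro s hs hds
        obtain ⟨x, y, q, rfl⟩ : ∃ x y q, s = [x, y, q] := by
          have := h3 s hs
          match s with
          | [x, y, q] => exact ⟨x, y, q, rfl⟩
        have hpc : (x, y, q) ∈ cands cx cy radius towers :=
          cands_of_mem cx cy radius towers x y q hs ((dOK_cons cx cy radius x y q).mp hds)
        rw [dK_le_iff]
        apply minBy_le cs c
        rcases List.mem_cons.mp (hcl ▸ hpc) with h | h
        · exact Or.inl h
        · exact Or.inr h
      have hcoord : (minBy c cs).1 = -1 ∧ (minBy c cs).2.1 = -1 := by
        by_contra hco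
        refine hnd ⟨[(minBy c cs).1, (minBy c cs).2.1, (minBy c cs).2.2], hmemM,
          (dOK_cons cx cy radius _ _ _).mpr hrleM,
          (two_le_dK_iff _ _ _).mpr hqM, ?_, hbeats⟩
        simp only [List.take, ne_eq, List.cons.injEq, and_true]
        omega
      rw [minCoords_cons, hcoord.1, hcoord.2]
      rfl

theorem bestTower_changed : Claim_changed_bestTower := by
  unfold Claim_changed_bestTower; decide

theorem bestTower_tight : Claim_exact_bestTower := by
  intro towers center radius _ hpre hd
  obtain ⟨hc2, h3⟩ := hpre
  obtain ⟨cx, cy, rfl⟩ : ∃ cx cy, center = [cx, cy] := by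
    match center, hc2 with
    | [cx, cy], _ => exact ⟨cx, cy, rfl⟩
  obtain ⟨t0, ht0, hd0, hq0, hc0, hb0⟩ := hd
  obtain ⟨x0, y0, q0, rfl⟩ : ∃ x y q, t0 = [x, y, q] := by
    have := h3 t0 ht0
    match t0 with
    | [x, y, q] => exact ⟨x, y, q, rfl⟩
  rw [dOK_cons] at hd0
  rw [two_le_dK_iff] at hq0
  -- every in-radius tower is beaten by t0, hence has quality ≤ q0 < -1
  have hg : (cands cx cy radius towers).filter goodC = [] := by
    apply (gcands_eq_nil_iff cx cy radius towers h3).mpr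
    intro t ht h3t hle
    obtain ⟨x, y, q, rfl⟩ : ∃ x y q, t = [x, y, q] := by
      match t with
      | [x, y, q] => exact ⟨x, y, q, rfl⟩
    have hb := (dK_le_iff x0 y0 q0 x y q).mp
      (hb0 [x, y, q] ht ((dOK_cons cx cy radius x y q).mpr (by simpa [List.getD] using hle)))
    unfold tripLe keyOf at hb
    simp only [List.getD_cons_zero, List.getD_cons_succ] at hb ⊢
    omega
  have hA : bestTower towers [cx, cy] radius = [-1, -1] := by
    rw [bestTower_eq, bestLoop_start cx cy radius towers h3, hg]
    rfl
  have hp0 : ((x0 : Int), (y0 : Int), (q0 : Int)) ∈ cands cx cy radius towers :=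
    cands_of_mem cx cy radius towers x0 y0 q0 ht0 hd0
  cases hcl : cands cx cy radius towers with
  | nil => rw [hcl] at hp0; simp at hp0
  | cons c cs =>
    have hB : bestTower_alt towers [cx, cy] radius = [(minBy c cs).1, (minBy c cs).2.1] := by
      rw [bestTower_alt_eq cx cy radius towers h3, hcl, minCoords_cons]
    rw [hA, hB]
    intro heq
    have hx : (-1 : Int) = (minBy c cs).1 := by
      have := congrArg (fun l => List.getD l 0 (0 : Int)) heq
      simpa using this
    have hy : (-1 : Int) = (minBy c cs).2.1 := by
      have := congrArg (fun l => List.getD l 1 (0 : Int)) heq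
      simpa using this
    obtain ⟨hmemM, hrleM⟩ := mem_cands cx cy radius towers h3 (minBy c cs) (by
      rw [hcl]
      rcases minBy_mem cs c with h | h
      · rw [h]; exact List.mem_cons_self
      · exact List.mem_cons_of_mem _ h)
    -- t0 beats the min candidate and vice versa, so they share coordinates (-1,-1)
    have hb := (dK_le_iff x0 y0 q0 _ _ _).mp
      (hb0 [(minBy c cs).1, (minBy c cs).2.1, (minBy c cs).2.2] hmemM
        ((dOK_cons cx cy radius _ _ _).mpr hrleM))
    have hlt : tripLe (keyOf (minBy c cs)) (keyOf (x0, y0, q0)) := by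
      apply minBy_le cs c
      rcases List.mem_cons.mp (hcl ▸ hp0) with h | h
      · exact Or.inl h
      · exact Or.inr h
    unfold tripLe keyOf at hb hlt
    simp only at hb hlt
    have hc0' : ¬(x0 = -1 ∧ y0 = -1) := by
      intro ⟨h1, h2⟩
      exact hc0 (by simp [h1, h2])
    omega
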